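-- pv_equiv track=rewrite | github.com/jschnab/leetcode | arrays/capture_forts.py | capture2
-- ===== SOURCE A (Python) =====
-- def capture2(forts):
--     maxi = 0
--     i = 0
--     for j in range(len(forts)):
--         if forts[j] != 0:
--             if forts[i] == -forts[j]:
--                 maxi = max(maxi, j - i - 1)
--             i = j
--     return maxi
-- ===== SOURCE B (Python) =====
-- def capture2(forts):
--     # Phase 1: run-length encode forts into (value, count) runs.
--     runs = []
--     i = 0
--     n = len(forts)
--     while i < n:
--         j = i + 1
--         while j < n and forts[j] == forts[i]:
--             j += 1
--         runs.append((forts[i], j - i))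
--         i = j
--     # Phase 2: a zero-run strictly between two opposite-valued runs is capturable;
--     # the answer is the longest such run (0 if none).
--     best = 0
--     for k in range(len(runs) - 2):
--         l, m, r = runs[k], runs[k + 1], runs[k + 2]
--         if m[0] == 0 and l[0] == -r[0]:
--             best = max(best, m[1])
--     return best
-- ===== Notes on version B (the rewrite author's own statement) =====
-- stated objective: alternative
-- what changed: Replaces the last-seen-pointer index scan (tracking maxi via index differences j-i-1) by a run-length-encoding algorithm: compress forts into (value,count) runs, then the answer is the longest zero-run whose two neighbouring runs have opposite values, read directly as that run's stored count.
import Mathlib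
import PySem

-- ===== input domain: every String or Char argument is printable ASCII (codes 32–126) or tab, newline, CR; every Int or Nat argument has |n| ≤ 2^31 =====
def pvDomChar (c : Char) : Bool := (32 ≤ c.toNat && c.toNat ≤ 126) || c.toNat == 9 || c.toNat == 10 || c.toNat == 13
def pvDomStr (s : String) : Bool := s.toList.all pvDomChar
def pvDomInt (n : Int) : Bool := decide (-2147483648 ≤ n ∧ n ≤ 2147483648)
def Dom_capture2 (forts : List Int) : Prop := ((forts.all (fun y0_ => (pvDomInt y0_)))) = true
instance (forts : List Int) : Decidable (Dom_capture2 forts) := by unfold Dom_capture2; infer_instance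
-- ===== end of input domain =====

-- B replaces A's single-pass last-seen-pointer index scan by a run-length-encoding algorithm:
-- compress forts into (value,count) runs, then take the longest zero-run flanked by opposite runs.


-- ===== PORT A =====
def capture2 (forts : List Int) : Int :=
  ((PySem.List.pyRange 0 (forts.length : Int) 1).foldl
    (fun (st : Int × Int) j =>
      if PySem.List.pyGetD forts j 0 ≠ 0 then
        ((if PySem.List.pyGetD forts st.2 0 = -(PySem.List.pyGetD forts j 0)
            then max st.1 (j - st.2 - 1) else st.1), j)
      else st)
    (0, 0)).1

-- ===== PORT B =====
/-- Phase 1 of B: run-length encode into (value, count) runs; the inner `while` that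
    advances `j` past equal elements is the takeWhile/dropWhile split of the suffix. -/
def rleB : List Int → List (Int × Int)
  | [] => []
  | v :: t =>
      (v, 1 + ((t.takeWhile (fun y => y == v)).length : Int)) ::
        rleB (t.dropWhile (fun y => y == v))
  termination_by xs => xs.length
  decreasing_by
    have := List.length_dropWhile_le (fun y => y == v) t
    simp; omega

/-- Phase 2 of B: slide a window of three consecutive runs (l, m, r). -/
def scanRuns : List (Int × Int) → Int → Int
  | l :: m :: r :: t, best =>
      scanRuns (m :: r :: t) (if m.1 = 0 ∧ l.1 = -r.1 then max best m.2 else best)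
  | _, best => best

def capture2_alt (forts : List Int) : Int := scanRuns (rleB forts) 0

-- ===== PRECONDITION & SPEC =====
def Spec_capture2 (forts : List Int) (out : Int) : Prop := out = capture2_alt forts
instance (forts : List Int) (out : Int) : Decidable (Spec_capture2 forts out) := by unfold Spec_capture2; infer_instance

-- ===== CLAIM (what is proved, stated in full; the proofs are below) =====
def Claim_equal_capture2 : Prop := ∀ (forts : List Int), Dom_capture2 forts → Spec_capture2 forts (capture2 forts)

-- ===== LEMMAS AND PROOFS =====

/-- A's loop restated with an explicit zero-counter instead of the index pair:
    z = j - i - 1, v = forts[i]. -/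
def goZ : List Int → Int → Int → Int → Int
  | [], _, _, m => m
  | x :: t, z, v, m =>
      if x = 0 then goZ t (z + 1) v m
      else goZ t 0 x (if v = -x then max m z else m)

/-- A's foldl over the index range, started anywhere, is `goZ` on the remaining suffix. -/
lemma foldA_eq_goZ (forts : List Int) :
    ∀ (t : List Int) (j i m : Int), 0 ≤ j → 0 ≤ i →
    forts.drop j.toNat = t →
    ((PySem.List.pyRange j (forts.length : Int) 1).foldl
      (fun (st : Int × Int) jj =>
        if PySem.List.pyGetD forts jj 0 ≠ 0 then
          ((if PySem.List.pyGetD forts st.2 0 = -(PySem.List.pyGetD forts jj 0)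
              then max st.1 (jj - st.2 - 1) else st.1), jj)
        else st)
      (m, i)).1
    = goZ t (j - i - 1) (PySem.List.pyGetD forts i 0) m := by
  intro t
  induction t with
  | nil =>
    intro j i m hj hi hdrop
    have hlen : forts.length ≤ j.toNat := by
      have := congrArg List.length hdrop
      simp [List.length_drop] at this
      omega
    rw [PySem.List.pyRange_one_eq_nil (by omega)]
    simp [goZ]
  | cons x t ih =>
    intro j i m hj hi hdrop
    have hlen : j.toNat < forts.length := by
      have := congrArg List.length hdrop
      simp [List.length_drop] at this
      omega
    have hx : forts[j.toNat] = x := by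
      have := List.getElem_cons_drop (as := forts) (i := j.toNat) hlen
      rw [hdrop] at this
      exact (List.cons.injEq _ _ _ _ ▸ this.symm).1.symm
    have hxj : PySem.List.pyGetD forts j 0 = x := by
      rw [PySem.List.pyGetD_eq_getElem forts 0 hj (by omega), hx]
    have hdrop' : forts.drop (j + 1).toNat = t := by
      have : (j + 1).toNat = j.toNat + 1 := by omega
      rw [this]
      have := List.getElem_cons_drop (as := forts) (i := j.toNat) hlen
      rw [hdrop] at this
      exact (List.cons.injEq _ _ _ _ ▸ this.symm).2.symm
    rw [PySem.List.pyRange_one_cons (by omega)]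
    simp only [List.foldl_cons, hxj]
    by_cases hx0 : x = 0
    · subst hx0
      simp only [ne_eq, not_true_eq_false, if_false]
      rw [ih (j + 1) i m (by omega) hi hdrop']
      have harith : j + 1 - i - 1 = (j - i - 1) + 1 := by ring
      rw [harith]
      simp [goZ]
    · simp only [ne_eq, hx0, not_false_eq_true, if_true]
      rw [ih (j + 1) j _ (by omega) hj hdrop']
      have harith : j + 1 - j - 1 = (0 : Int) := by ring
      rw [harith, hxj]
      simp [goZ, hx0]

/-- `scanRuns` never reads the head run's count. -/
lemma scanRuns_head_count (x c1 c2 m : Int) (rs : List (Int × Int)) :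
    scanRuns ((x, c1) :: rs) m = scanRuns ((x, c2) :: rs) m := by
  match rs with
  | [] => rfl
  | [a] => rfl
  | a :: b :: rs' => simp [scanRuns]

/-- Two adjacent nonzero same-valued head runs collapse to one (counts unread). -/
lemma scanRuns_merge_head (x c1 c2 c3 m : Int) (hx : x ≠ 0) (rs : List (Int × Int)) :
    scanRuns ((x, c1) :: (x, c2) :: rs) m = scanRuns ((x, c3) :: rs) m := by
  match rs with
  | [] => rfl
  | r :: rs' =>
    show scanRuns ((x, c2) :: r :: rs')
        (if x = 0 ∧ x = -r.1 then max m c2 else m) = _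
    rw [if_neg (by tauto)]
    exact scanRuns_head_count x c2 c3 m (r :: rs')

/-- Replacing the head run's count by the full merged count of a leading x-run. -/
lemma scanRuns_rle_head (x : Int) (hx : x ≠ 0) (t : List Int) (c m : Int) :
    scanRuns ((x, c) :: rleB t) m
    = scanRuns ((x, 1 + ((t.takeWhile (fun y => y == x)).length : Int)) ::
        rleB (t.dropWhile (fun y => y == x))) m := by
  match t with
  | [] => simp [rleB, scanRuns]
  | a :: t2 =>
    by_cases ha : a = x
    · subst ha
      rw [rleB]
      rw [List.takeWhile_cons_of_pos (p := fun y => y == a) (by simp),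
        List.dropWhile_cons_of_pos (p := fun y => y == a) (by simp), List.length_cons]
      exact scanRuns_merge_head a c _ _ m hx _
    · rw [List.takeWhile_cons_of_neg (p := fun y => y == x) (by simp [ha]),
        List.dropWhile_cons_of_neg (p := fun y => y == x) (by simp [ha]), List.length_nil]
      exact scanRuns_head_count x c _ m _

/-- A leading zero-run at the very front of the runs list is never a middle run.
    (`rs` is empty or headed by a nonzero-valued run.) -/
lemma scanRuns_drop_zero_head (a m : Int) (rs : List (Int × Int))
    (h : rs = [] ∨ ∃ x c rs', rs = (x, c) :: rs' ∧ x ≠ 0) :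
    scanRuns ((0, a) :: rs) m = scanRuns rs m := by
  rcases h with rfl | ⟨x, c, rs', rfl, hx⟩
  · simp [scanRuns]
  · match rs' with
    | [] => rfl
    | r :: rs'' =>
      show scanRuns ((x, c) :: r :: rs'') (if x = 0 ∧ 0 = -r.1 then max m c else m) = _
      rw [if_neg (by tauto)]

/-- `rleB` of a list with nonzero head starts with a nonzero-valued run. -/
lemma rleB_head_nonzero (t : List Int)
    (h : t = [] ∨ ∃ x t2, t = x :: t2 ∧ x ≠ 0) :
    rleB t = [] ∨ ∃ x c rs', rleB t = (x, c) :: rs' ∧ x ≠ 0 := by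
  rcases h with rfl | ⟨x, t2, rfl, hx⟩
  · left; simp [rleB]
  · right; exact ⟨x, _, _, by rw [rleB], hx⟩

/-- Structure of `dropWhile (== 0)`: empty or nonzero head. -/
lemma dropWhile_zero_shape (t : List Int) :
    t.dropWhile (fun y => y == 0) = [] ∨
    ∃ x t2, t.dropWhile (fun y => y == 0) = x :: t2 ∧ x ≠ 0 := by
  induction t with
  | nil => left; rfl
  | cons a t2 ih =>
    by_cases ha : a = 0
    · subst ha; simpa using ih
    · right; exact ⟨a, t2, by simp [ha], ha⟩

/-- The central correspondence, by structural induction: with a nonzero previous value v,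
    (L0) while counting zeros, goZ computes scanRuns with the pending zero-run made explicit;
    (L1) just after a reset, goZ computes scanRuns with the previous run prepended. -/
lemma goZ_eq_scanRuns (t : List Int) :
    (∀ z v c m, v ≠ 0 → 0 ≤ m → 0 ≤ z →
      goZ t z v m
      = scanRuns ((v, c) :: (0, z + ((t.takeWhile (fun y => y == 0)).length : Int)) ::
          rleB (t.dropWhile (fun y => y == 0))) m)
    ∧ (∀ v c m, v ≠ 0 → 0 ≤ m →
      goZ t 0 v m = scanRuns ((v, c) :: rleB t) m) := by
  induction t with
  | nil =>
    constructor
    · intro z v c m _ _ _; simp [goZ, rleB, scanRuns]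
    · intro v c m _ _; simp [goZ, rleB, scanRuns]
  | cons a t2 ih =>
    have L0 := ih.1
    have L1 := ih.2
    constructor
    · -- L0 for a :: t2
      intro z v c m hv hm hz
      by_cases ha : a = 0
      · subst ha
        rw [goZ, if_pos rfl]
        rw [L0 (z + 1) v c m hv hm (by omega)]
        rw [List.takeWhile_cons_of_pos (p := fun y => y == (0:Int)) (by simp),
          List.dropWhile_cons_of_pos (p := fun y => y == (0:Int)) (by simp), List.length_cons]
        have : z + 1 + ((t2.takeWhile (fun y => y == 0)).length : Int)
             = z + (((t2.takeWhile (fun y => y == 0)).length : Int) + 1) := by ring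
        rw [this]
        push_cast
        ring_nf
      · rw [goZ, if_neg ha]
        rw [List.takeWhile_cons_of_neg (p := fun y => y == (0:Int)) (by simp [ha]),
          List.dropWhile_cons_of_neg (p := fun y => y == (0:Int)) (by simp [ha]), List.length_nil]
        have hm' : 0 ≤ (if v = -a then max m z else m) := by
          split_ifs
          · exact le_max_of_le_left hm
          · exact hm
        rw [L1 a c (if v = -a then max m z else m) ha hm']
        rw [scanRuns_rle_head a ha t2 c _]
        rw [rleB]
        simp only [Nat.cast_zero, add_zero]
        conv_rhs => rw [scanRuns]
        simp only [true_and]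
        cases hrs : rleB (t2.dropWhile (fun y => y == a)) with
        | nil => simp [scanRuns]
        | cons r rs'' =>
          conv_rhs => rw [scanRuns]
          rw [if_neg (show ¬(a = 0 ∧ (0 : Int) = -r.1) by tauto)]
    · -- L1 for a :: t2
      intro v c m hv hm
      by_cases ha : a = 0
      · subst ha
        rw [goZ, if_pos rfl]
        have h01 : (0 : Int) + 1 = 1 := by norm_num
        rw [h01, L0 1 v c m hv hm (by omega)]
        rw [rleB]
      · rw [goZ, if_neg ha]
        have : (if v = -a then max m 0 else m) = m := by
          split_ifs
          · omega
          · rfl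
        rw [this]
        rw [L1 a c m ha hm]
        rw [scanRuns_rle_head a ha t2 c m]
        rw [rleB]
        cases hrs : rleB (t2.dropWhile (fun y => y == a)) with
        | nil => simp [scanRuns]
        | cons r rs'' =>
          conv_rhs => rw [scanRuns]
          rw [if_neg (show ¬(a = 0 ∧ v = -r.1) by tauto)]

/-- With previous value 0 (A's initial pointer before any fort), nothing ever matches
    until the first nonzero element; leading zeros are discarded on both sides. -/
lemma goZ_zero_prev (t : List Int) :
    ∀ z m, 0 ≤ m →
    goZ t z 0 m = scanRuns (rleB (t.dropWhile (fun y => y == 0))) m := by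
  induction t with
  | nil => intro z m _; simp [goZ, rleB, scanRuns]
  | cons a t2 ih =>
    intro z m hm
    by_cases ha : a = 0
    · subst ha
      rw [goZ]
      rw [if_pos rfl, List.dropWhile_cons_of_pos (p := fun y => y == (0:Int)) (by simp)]
      exact ih (z + 1) m hm
    · rw [goZ, if_neg ha]
      rw [if_neg (by omega)]
      rw [(goZ_eq_scanRuns t2).2 a a m ha hm]
      rw [scanRuns_rle_head a ha t2 a m]
      rw [List.dropWhile_cons_of_neg (by simp [ha]), rleB]

-- ===== VERDICT (by name: the statement is the Claim_ definition above) =====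
theorem capture2_spec : Claim_equal_capture2 := by
  intro forts _
  show capture2 forts = capture2_alt forts
  unfold capture2
  rw [foldA_eq_goZ forts forts 0 0 0 le_rfl le_rfl (by simp)]
  match forts with
  | [] => simp [goZ, capture2_alt, rleB, scanRuns]
  | f :: r =>
    have hf0 : PySem.List.pyGetD (f :: r) (0 : Int) 0 = f := by
      simp [PySem.List.pyGetD_zero_cons]
    rw [hf0]
    by_cases hf : f = 0
    · subst hf
      rw [goZ, if_pos rfl]
      rw [goZ_zero_prev r (0 - 0 - 1 + 1) 0 le_rfl]
      unfold capture2_alt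
      rw [rleB]
      exact (scanRuns_drop_zero_head _ 0 _
        (rleB_head_nonzero _ (dropWhile_zero_shape r))).symm
    · rw [goZ, if_neg hf]
      rw [if_neg (by omega)]
      rw [(goZ_eq_scanRuns r).2 f f 0 hf le_rfl]
      rw [scanRuns_rle_head f hf r f 0]
      unfold capture2_alt
      rw [rleB]
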